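-- pv_equiv track=rewrite | github.com/cedney97/everybody_codes | ec2024/day2/main.py | counted_symbols
-- ===== SOURCE A (Python) =====
-- def counted_symbols(word: str, keys: list[str]):
--     counted_indices = set()
--
--     for key in keys:
--         start = 0
--         while True:
--             index = word.find(key, start)
--             if index == -1:
--                 break
--
--             for i in range(index, index + len(key)):
--                 counted_indices.add(i)
--
--             start = index + 1
--
--     return len(counted_indices)
-- ===== SOURCE B (Python) =====
-- def counted_symbols(word: str, keys: list[str]):
--     # Count positions j of word covered by some occurrence of some key:
--     # a direct per-index coverage test instead of repeated str.find plus a set.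
--     count = 0
--     for j in range(len(word)):
--         if any(word[i:i + len(key)] == key
--                for key in keys if key
--                for i in range(max(0, j - len(key) + 1), j + 1)):
--             count += 1
--     return count
-- ===== Notes on version B (the rewrite author's own statement) =====
-- stated objective: alternative
-- what changed: B replaces A's per-key repeated str.find scans that accumulate covered indices into a set by a direct per-index coverage test: for each position j of word it checks whether some occurrence of some key covers j, counting positions in one pass with no set and no find.
import Mathlib
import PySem

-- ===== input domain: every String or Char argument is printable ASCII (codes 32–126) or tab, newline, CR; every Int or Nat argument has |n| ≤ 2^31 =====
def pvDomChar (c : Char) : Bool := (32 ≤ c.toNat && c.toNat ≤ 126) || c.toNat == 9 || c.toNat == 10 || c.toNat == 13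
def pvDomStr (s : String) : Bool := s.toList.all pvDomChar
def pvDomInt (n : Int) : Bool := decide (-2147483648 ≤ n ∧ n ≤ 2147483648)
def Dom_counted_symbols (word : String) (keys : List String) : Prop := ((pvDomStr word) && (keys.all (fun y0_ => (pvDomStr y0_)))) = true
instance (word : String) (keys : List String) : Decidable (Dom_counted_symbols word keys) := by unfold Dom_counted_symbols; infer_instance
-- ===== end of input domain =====

-- B re-implements the count as a direct per-index coverage test (no str.find, no set of indices);
-- the theorem: A and B return the same value on every input.

-- ===== PORT A =====

-- bounds of word.find(key, start), needed by the while loop's termination argument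
theorem pvFindFrom_bounds (w key : List Char) (start : Nat)
    (h : PySem.Chars.findFrom w key (start : Int) none ≠ -1) :
    start ≤ w.length ∧ (start : Int) ≤ PySem.Chars.findFrom w key (start : Int) none ∧
      (PySem.Chars.findFrom w key (start : Int) none).toNat ≤ w.length := by
  have hsl : start ≤ w.length := by
    by_contra hgt
    apply h
    simp only [PySem.Chars.findFrom]
    split_ifs with h1 h2 h3 <;> try rfl
    all_goals omega
  refine ⟨hsl, ?_⟩
  rw [PySem.Chars.findFrom_natCast w key start hsl] at h ⊢
  split_ifs at h ⊢ with hf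
  · exact absurd rfl h
  · have h0 : (0:Int) ≤ PySem.Chars.find (w.drop start) key := by
      have := PySem.Chars.neg_one_le_find (w.drop start) key
      omega
    have hle := PySem.Chars.find_le_length (w.drop start) key
    rw [List.length_drop] at hle
    omega

def csWhile (w key : List Char) (start : Nat) (acc : PySem.Set Int) : PySem.Set Int :=
  let index := PySem.Chars.findFrom w key (start : Int) none
  if h : index = -1 then acc
  else
    let acc' := (PySem.List.pyRange index (index + (key.length : Int)) 1).foldl PySem.Set.add acc
    csWhile w key (index.toNat + 1) acc'
termination_by w.length + 1 - start
decreasing_by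
  have hb := pvFindFrom_bounds w key start h
  omega


-- A: for each key, the find/add while loop, folded over the keys; return len of the set
def counted_symbols (word : String) (keys : List String) : Int :=
  let counted_indices := keys.foldl (fun acc key => csWhile word.toList key.toList 0 acc) PySem.Set.empty
  (counted_indices.length : Int)

-- ===== PORT B =====
def counted_symbols_alt (word : String) (keys : List String) : Int :=
  (PySem.List.pyRange 0 (PySem.Chars.len word.toList) 1).foldl
    (fun count j =>
      if keys.any (fun key =>
            !(key.toList.isEmpty) &&
            (PySem.List.pyRange (max 0 (j - PySem.Chars.len key.toList + 1)) (j + 1) 1).any (fun i =>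
              PySem.List.slice word.toList (some i) (some (i + PySem.Chars.len key.toList)) == key.toList))
      then count + 1 else count) 0

-- ===== PRECONDITION & SPEC =====
def Spec_counted_symbols (word : String) (keys : List String) (out : Int) : Prop := out = counted_symbols_alt word keys
instance (word : String) (keys : List String) (out : Int) : Decidable (Spec_counted_symbols word keys out) := by unfold Spec_counted_symbols; infer_instance

-- ===== CLAIM (what is proved, stated in full; the proofs are below) =====
def Claim_equal_counted_symbols : Prop := ∀ (word : String) (keys : List String), Dom_counted_symbols word keys → Spec_counted_symbols word keys (counted_symbols word keys)

-- ===== LEMMAS AND PROOFS =====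

-- 'index j of w is covered by an occurrence of some key'
def covB (w : List Char) (keys : List String) (j : Nat) : Bool :=
  keys.any fun key => (List.range (j + 1)).any fun i =>
    decide (j < i + key.toList.length) && decide (key.toList <+: w.drop i)

theorem covB_iff (w : List Char) (keys : List String) (j : Nat) :
    covB w keys j = true ↔
      ∃ key ∈ keys, ∃ i : Nat, i ≤ j ∧ j < i + key.toList.length ∧ key.toList <+: w.drop i := by
  simp [covB]

theorem covB_lt_length (w : List Char) (keys : List String) (j : Nat)
    (h : covB w keys j = true) : j < w.length := by
  rw [covB_iff] at h
  obtain ⟨key, -, i, hij, hjl, hp⟩ := h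
  have hlen := hp.length_le
  rw [List.length_drop] at hlen
  by_cases hi : i < w.length
  · omega
  · have : w.drop i = [] := List.drop_eq_nil_of_le (by omega)
    rw [this, List.prefix_nil] at hp
    simp [hp] at hjl
    omega

-- the slice test of B is the prefix test
theorem slice_eq_prefix (w key : List Char) (i : Nat) :
    (PySem.List.slice w (some (i:Int)) (some ((i:Int) + (key.length : Int))) == key) = decide (key <+: w.drop i) := by
  rw [PySem.List.slice_toNat w (by positivity) (by positivity)]
  simp only [Int.toNat_natCast]
  have h1 : ((i:Int) + (key.length:Int)).toNat - i = key.length := by omega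
  rw [h1]
  rcases Decidable.em (key <+: w.drop i) with hp | hp
  · simp [hp, (List.prefix_iff_eq_take.mp hp).symm]
  · simp only [hp, decide_false, beq_eq_false_iff_ne, ne_eq]
    intro he
    exact hp (List.prefix_iff_eq_take.mpr he.symm)

theorem inner_any_eq_covB (w : List Char) (keys : List String) (j : Nat) :
    (keys.any (fun key =>
        !(key.toList.isEmpty) &&
        (PySem.List.pyRange (max 0 ((j:Int) - PySem.Chars.len key.toList + 1)) ((j:Int) + 1) 1).any (fun i =>
          PySem.List.slice w (some i) (some (i + PySem.Chars.len key.toList)) == key.toList)))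
      = covB w keys j := by
  rw [Bool.eq_iff_iff]
  simp only [List.any_eq_true, Bool.and_eq_true, covB, decide_eq_true_eq, List.mem_range,
    PySem.List.mem_pyRange_one, PySem.Chars.len_eq, Bool.not_eq_eq_eq_not, Bool.not_true,
    List.isEmpty_eq_false_iff, ← List.length_pos_iff, Nat.lt_succ_iff]
  constructor
  · rintro ⟨key, hk, hne, i, ⟨hlo, hhi⟩, hsl⟩
    have h0 : 0 ≤ i := le_trans (le_max_left _ _) hlo
    have hi : i = ((i.toNat : Nat) : Int) := by omega
    rw [hi, slice_eq_prefix w key.toList i.toNat] at hsl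
    exact ⟨key, hk, i.toNat, by omega, by omega, of_decide_eq_true hsl⟩
  · rintro ⟨key, hk, ni, hij, hjl, hp⟩
    refine ⟨key, hk, by omega, (ni : Int), ⟨by omega, by omega⟩, ?_⟩
    rw [slice_eq_prefix w key.toList ni]
    exact decide_eq_true hp

theorem foldl_count' {α : Type} (l : List α) (p f : α → Bool) (c : Int)
    (h : ∀ x ∈ l, f x = p x) :
    l.foldl (fun c x => if f x then c + 1 else c) c = c + (l.countP p : Int) := by
  induction l generalizing c with
  | nil => simp
  | cons x xs ih =>
    have hx := h x (List.mem_cons_self)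
    have ih' : ∀ c : Int, xs.foldl (fun c x => if f x then c + 1 else c) c = c + (xs.countP p : Int) := by
      intro c
      apply ih
      exact fun y hy => h y (List.mem_cons_of_mem _ hy)
    by_cases hp : p x <;> simp [hx, hp, ih']; omega

theorem alt_eq_countP (word : String) (keys : List String) :
    counted_symbols_alt word keys =
      ((List.range word.toList.length).countP (covB word.toList keys) : Int) := by
  unfold counted_symbols_alt
  rw [PySem.Chars.len_eq, PySem.List.pyRange_zero_natCast, List.foldl_map]
  have h := foldl_count' (List.range word.toList.length)
      (covB word.toList keys)
      (fun j : Nat => keys.any (fun key =>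
        !(key.toList.isEmpty) &&
        (PySem.List.pyRange (max 0 ((j:Int) - PySem.Chars.len key.toList + 1)) ((j:Int) + 1) 1).any (fun i =>
          PySem.List.slice word.toList (some i) (some (i + PySem.Chars.len key.toList)) == key.toList)))
      0 (fun j _ => inner_any_eq_covB word.toList keys j)
  simpa using h
theorem csWhile_mem (w key : List Char) (start : Nat) (acc : PySem.Set Int) (x : Int) :
    x ∈ csWhile w key start acc ↔
      x ∈ acc ∨ ∃ i j : Nat, start ≤ i ∧ key <+: w.drop i ∧ i ≤ j ∧ j < i + key.length ∧ x = (j : Int) := by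
  fun_induction csWhile w key start acc with
  | case1 start acc index hneg =>
    constructor
    · exact Or.inl
    · rintro (hx | ⟨i, j, hsi, hp, hij, hjl, rfl⟩)
      · exact hx
      · exfalso
        by_cases hsl : start ≤ w.length
        · have hni : ¬ key <:+: w.drop start :=
            (PySem.Chars.findFrom_natCast_eq_neg_one_iff w key start hsl).mp hneg
          apply hni
          have hd : (w.drop start).drop (i - start) = w.drop i := by
            rw [List.drop_drop]
            congr 1
            omega
          have hpre : key <+: (w.drop start).drop (i - start) := by rw [hd]; exact hp
          exact (PySem.Chars.isIn_iff_infix key (w.drop start)).mp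
            ((PySem.Chars.exists_prefix_drop_iff_isIn key (w.drop start)).mp ⟨i - start, hpre⟩)
        · have hd : w.drop i = [] := List.drop_eq_nil_of_le (by omega)
          rw [hd, List.prefix_nil] at hp
          rw [hp] at hjl
          simp at hjl
          omega
  | case2 start acc index hneg acc' ih =>
    obtain ⟨hsl, hge, hle⟩ := pvFindFrom_bounds w key start hneg
    obtain ⟨hki, hocc, hmin⟩ := PySem.Chars.findFrom_natCast_spec w key start hsl hneg
    have hinn : (0:Int) ≤ index := le_trans (by positivity) hge
    have hitn : index = (index.toNat : Int) := by omega
    rw [ih]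
    have hacc' : ∀ y : Int, y ∈ acc' ↔ y ∈ acc ∨ (index ≤ y ∧ y < index + key.length) := by
      intro y
      rw [show acc' = PySem.Set.update acc (PySem.List.pyRange index (index + (key.length:Int)) 1) from rfl]
      rw [PySem.Set.mem_update]
      simp [PySem.List.mem_pyRange_one]
    constructor
    · rintro (hy | ⟨i, j, hsi, hp, hij, hjl, rfl⟩)
      · rw [hacc'] at hy
        rcases hy with hy | ⟨h1, h2⟩
        · exact Or.inl hy
        · exact Or.inr ⟨index.toNat, x.toNat, by omega, hocc, by omega, by omega, by omega⟩
      · exact Or.inr ⟨i, j, by omega, hp, hij, hjl, rfl⟩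
    · rintro (hy | ⟨i, j, hsi, hp, hij, hjl, rfl⟩)
      · exact Or.inl ((hacc' x).mpr (Or.inl hy))
      · rcases Nat.lt_trichotomy i index.toNat with hlt | heq | hgt
        · exact absurd hp (hmin i hsi hlt)
        · left
          rw [hacc']
          right
          subst heq
          constructor <;> omega
        · exact Or.inr ⟨i, j, by omega, hp, hij, hjl, rfl⟩

theorem csWhile_nodup (w key : List Char) (start : Nat) (acc : PySem.Set Int)
    (h : acc.Nodup) : (csWhile w key start acc).Nodup := by
  fun_induction csWhile w key start acc with
  | case1 start acc index hneg => exact h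
  | case2 start acc index hneg acc' ih =>
    apply ih
    exact PySem.Set.nodup_update acc _ h

theorem foldl_keys_mem (w : List Char) (keys : List String) (acc : PySem.Set Int) (x : Int) :
    x ∈ keys.foldl (fun acc key => csWhile w key.toList 0 acc) acc ↔
      x ∈ acc ∨ ∃ key ∈ keys, ∃ i j : Nat, key.toList <+: w.drop i ∧ i ≤ j ∧ j < i + key.toList.length ∧ x = (j : Int) := by
  induction keys generalizing acc with
  | nil => simp
  | cons k ks ih =>
    simp only [List.foldl_cons, ih, csWhile_mem, List.mem_cons]
    constructor
    · rintro (((hx | ⟨i, j, _, hp, hij, hjl, hxj⟩) | ⟨key, hk, i, j, hp, hij, hjl, hxj⟩))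
      · exact Or.inl hx
      · exact Or.inr ⟨k, Or.inl rfl, i, j, hp, hij, hjl, hxj⟩
      · exact Or.inr ⟨key, Or.inr hk, i, j, hp, hij, hjl, hxj⟩
    · rintro (hx | ⟨key, (rfl | hk), i, j, hp, hij, hjl, hxj⟩)
      · exact Or.inl (Or.inl hx)
      · exact Or.inl (Or.inr ⟨i, j, Nat.zero_le _, hp, hij, hjl, hxj⟩)
      · exact Or.inr ⟨key, hk, i, j, hp, hij, hjl, hxj⟩

theorem foldl_keys_nodup (w : List Char) (keys : List String) (acc : PySem.Set Int)
    (h : acc.Nodup) : (keys.foldl (fun acc key => csWhile w key.toList 0 acc) acc).Nodup := by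
  induction keys generalizing acc with
  | nil => exact h
  | cons k ks ih => exact ih _ (csWhile_nodup _ _ _ _ h)

theorem a_eq_countP (word : String) (keys : List String) :
    counted_symbols word keys =
      ((List.range word.toList.length).countP (covB word.toList keys) : Int) := by
  set w := word.toList with hw
  set F := keys.foldl (fun acc key => csWhile w key.toList 0 acc) PySem.Set.empty with hF
  have hA : counted_symbols word keys = (F.length : Int) := rfl
  set L := List.map (Nat.cast : Nat → Int) ((List.range w.length).filter (covB w keys)) with hL
  have hFnodup : F.Nodup := foldl_keys_nodup w keys _ List.nodup_nil
  have hLnodup : L.Nodup := by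
    apply List.Nodup.map
    · intro a b hab
      exact_mod_cast hab
    · exact (List.nodup_range).filter _
  have hmem : ∀ x : Int, x ∈ F ↔ x ∈ L := by
    intro x
    rw [hF, foldl_keys_mem, hL]
    simp only [List.mem_map, List.mem_filter, List.mem_range, PySem.Set.empty]
    constructor
    · rintro (hx | ⟨key, hk, i, j, hp, hij, hjl, rfl⟩)
      · simp at hx
      · exact ⟨j, ⟨covB_lt_length w keys j ((covB_iff w keys j).mpr ⟨key, hk, i, hij, hjl, hp⟩),
          (covB_iff w keys j).mpr ⟨key, hk, i, hij, hjl, hp⟩⟩, rfl⟩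
    · rintro ⟨j, ⟨hjn, hcov⟩, rfl⟩
      obtain ⟨key, hk, i, hij, hjl, hp⟩ := (covB_iff w keys j).mp hcov
      exact Or.inr ⟨key, hk, i, j, hp, hij, hjl, rfl⟩
  have hperm : F.Perm L := (List.perm_ext_iff_of_nodup hFnodup hLnodup).mpr hmem
  have hlen : F.length = L.length := hperm.length_eq
  rw [hA, hlen, hL, List.length_map, ← List.countP_eq_length_filter]

-- ===== VERDICT (by name: the statement is the Claim_ definition above) =====
theorem counted_symbols_spec : Claim_equal_counted_symbols := by
  intro word keys _
  unfold Spec_counted_symbols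
  rw [a_eq_countP, alt_eq_countP]
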